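-- pv_equiv track=rewrite | github.com/vikrambverma/Eco | UsrEcoApp/UtilAna.py | gf_FillUintToBinaryLi
-- ===== SOURCE A (Python) =====
-- def gf_FillUintToBinaryLi(i_data_value , i_data_len):
--     m = [0]*i_data_len
--     i = 0
--
--     while i < i_data_len:
--         m[i] = i_data_value % 256
--         i_data_value = i_data_value // 256
--         i = i + 1
--     return m
-- ===== SOURCE B (Python) =====
-- def gf_FillUintToBinaryLi(i_data_value, i_data_len):
--     # Reduce the value once into [0, 256**n), then let the builtin fixed-width
--     # little-endian conversion produce all bytes at once.
--     if i_data_len <= 0: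
--         return []
--     return list((i_data_value % (256 ** i_data_len)).to_bytes(i_data_len, 'little'))
-- ===== Notes on version B (the rewrite author's own statement) =====
-- stated objective: idiomatic
-- what changed: Instead of a per-byte loop threading a running quotient into a preallocated list, B reduces the value once modulo 256**n and converts it with the builtin fixed-width little-endian int.to_bytes, made total for negatives/oversized values by the single reduction.
import Mathlib
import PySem

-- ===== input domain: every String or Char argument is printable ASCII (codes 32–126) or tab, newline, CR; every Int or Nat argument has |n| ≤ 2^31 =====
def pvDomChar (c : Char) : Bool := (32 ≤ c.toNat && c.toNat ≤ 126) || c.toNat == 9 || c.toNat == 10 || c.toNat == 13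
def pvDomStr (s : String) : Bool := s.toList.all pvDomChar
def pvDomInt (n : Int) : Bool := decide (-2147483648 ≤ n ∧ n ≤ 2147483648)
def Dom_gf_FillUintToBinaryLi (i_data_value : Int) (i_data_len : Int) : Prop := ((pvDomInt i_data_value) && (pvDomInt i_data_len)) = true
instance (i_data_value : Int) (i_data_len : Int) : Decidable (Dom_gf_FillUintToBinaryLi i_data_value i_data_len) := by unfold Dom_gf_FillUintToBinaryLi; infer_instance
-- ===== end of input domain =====

-- B reduces the value once modulo 256**n and converts it in bulk with the builtin fixed-width
-- little-endian int.to_bytes, instead of A's per-byte loop that threads a running quotient into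
-- a preallocated list (objective: idiomatic).


-- ===== PORT A =====
-- while i < i_data_len: m[i] = v % 256; v = v // 256; i = i + 1
def pvALoop (i_data_value : Int) (i : Int) (i_data_len : Int) (m : List Int) : List Int :=
  if i < i_data_len then
    pvALoop (PySem.Int.floordiv i_data_value 256) (i + 1) i_data_len
      (m.set i.toNat (PySem.Int.mod i_data_value 256))
  else m
termination_by (i_data_len - i).toNat
decreasing_by omega

def gf_FillUintToBinaryLi (i_data_value : Int) (i_data_len : Int) : List Int :=
  pvALoop i_data_value 0 i_data_len (List.replicate i_data_len.toNat 0)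

-- ===== PORT B =====
-- hand port of int.to_bytes(n, 'little') on a nonnegative in-range value: the n little-endian
-- base-256 digits (exact for 0 ≤ r < 256^n, which the caller guarantees by reducing mod 256^n)
def pvToBytesLE : Int → Nat → List Int
  | _, 0 => []
  | r, n + 1 => PySem.Int.mod r 256 :: pvToBytesLE (PySem.Int.floordiv r 256) n

def gf_FillUintToBinaryLi_alt (i_data_value : Int) (i_data_len : Int) : List Int :=
  if i_data_len ≤ 0 then []
  else pvToBytesLE (PySem.Int.mod i_data_value (256 ^ i_data_len.toNat)) i_data_len.toNat

-- ===== PRECONDITION & SPEC =====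
def Spec_gf_FillUintToBinaryLi (i_data_value : Int) (i_data_len : Int) (out : List Int) : Prop := out = gf_FillUintToBinaryLi_alt i_data_value i_data_len
instance (i_data_value : Int) (i_data_len : Int) (out : List Int) : Decidable (Spec_gf_FillUintToBinaryLi i_data_value i_data_len out) := by unfold Spec_gf_FillUintToBinaryLi; infer_instance

-- ===== CLAIM =====
def Claim_equal_gf_FillUintToBinaryLi : Prop := ∀ (i_data_value : Int) (i_data_len : Int), Dom_gf_FillUintToBinaryLi i_data_value i_data_len → Spec_gf_FillUintToBinaryLi i_data_value i_data_len (gf_FillUintToBinaryLi i_data_value i_data_len)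

-- ===== LEMMAS AND PROOFS =====

-- reference little-endian byte expansion
def pvBytes (v : Int) : Nat → List Int
  | 0 => []
  | n + 1 => PySem.Int.mod v 256 :: pvBytes (PySem.Int.floordiv v 256) n

theorem pvALoop_eq (n : Nat) (v : Int) (pre suf : List Int) (hs : suf.length = n) :
    pvALoop v (pre.length : Int) ((pre.length : Int) + n) (pre ++ suf) =
      pre ++ pvBytes v n := by
  induction n generalizing v pre suf with
  | zero =>
    rw [pvALoop]
    simp at hs
    simp [hs, pvBytes]
  | succ n ih =>
    rw [pvALoop]
    have hlt : (pre.length : Int) < (pre.length : Int) + (n + 1 : Nat) := by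
      push_cast; omega
    rw [if_pos hlt]
    cases suf with
    | nil => simp at hs
    | cons h t =>
      have hset : (pre ++ h :: t).set (pre.length : Int).toNat (PySem.Int.mod v 256) =
          (pre ++ [PySem.Int.mod v 256]) ++ t := by
        simp
      rw [hset]
      have hlen : ((pre.length : Int) + 1) = (((pre ++ [PySem.Int.mod v 256]).length : Nat) : Int) := by
        simp
      have hlen2 : (pre.length : Int) + ((n + 1 : Nat) : Int) =
          (((pre ++ [PySem.Int.mod v 256]).length : Nat) : Int) + (n : Nat) := by
        simp; ring
      rw [hlen, hlen2, ih (PySem.Int.floordiv v 256) (pre ++ [PySem.Int.mod v 256]) t (by simpa using hs)]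
      simp [pvBytes]

-- (v % 256^(n+1)) % 256 = v % 256
theorem pv_mod_mod (v : Int) (n : Nat) :
    PySem.Int.mod (PySem.Int.mod v (256 ^ (n + 1))) 256 = PySem.Int.mod v 256 := by
  rw [PySem.Int.mod_eq_emod_of_pos (by positivity),
      PySem.Int.mod_eq_emod_of_pos (by norm_num),
      PySem.Int.mod_eq_emod_of_pos (by norm_num)]
  exact Int.emod_emod_of_dvd v ⟨256 ^ n, by rw [pow_succ]; ring⟩

-- (v % 256^(n+1)) // 256 = (v // 256) % 256^n
theorem pv_mod_div (v : Int) (n : Nat) :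
    PySem.Int.floordiv (PySem.Int.mod v (256 ^ (n + 1))) 256 =
      PySem.Int.mod (PySem.Int.floordiv v 256) (256 ^ n) := by
  rw [PySem.Int.mod_eq_emod_of_pos (by positivity),
      PySem.Int.floordiv_eq_ediv_of_pos (by norm_num),
      PySem.Int.floordiv_eq_ediv_of_pos (by norm_num),
      PySem.Int.mod_eq_emod_of_pos (by positivity)]
  have h1 : v % 256 ^ (n + 1) = v + 256 * (-(256 ^ n * (v / 256 ^ (n + 1)))) := by
    rw [Int.emod_def, pow_succ]; ring
  have h2 : v / 256 ^ (n + 1) = v / 256 / 256 ^ n := by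
    rw [Int.ediv_ediv_of_nonneg (by norm_num : (0:Int) ≤ 256)]
    congr 1
    rw [pow_succ]; ring
  rw [h1, Int.add_mul_ediv_left _ _ (by norm_num : (256:Int) ≠ 0), h2, Int.emod_def]
  ring

theorem pvToBytesLE_eq (n : Nat) (v : Int) :
    pvToBytesLE (PySem.Int.mod v (256 ^ n)) n = pvBytes v n := by
  induction n generalizing v with
  | zero => rfl
  | succ n ih =>
    rw [pvToBytesLE, pv_mod_mod, pv_mod_div, ih, pvBytes]

theorem gf_eq (v len : Int) : gf_FillUintToBinaryLi v len = gf_FillUintToBinaryLi_alt v len := by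
  unfold gf_FillUintToBinaryLi gf_FillUintToBinaryLi_alt
  by_cases hlen : len ≤ 0
  · rw [if_pos hlen, pvALoop, if_neg (by omega)]
    simp [Int.toNat_of_nonpos hlen]
  · rw [if_neg hlen]
    have key := pvALoop_eq len.toNat v [] (List.replicate len.toNat 0) (by simp)
    simp only [List.length_nil, Int.natCast_zero, List.nil_append, zero_add] at key
    rw [show len = ((len.toNat : Nat) : Int) by omega]
    simp only [Int.toNat_natCast]
    rw [key, pvToBytesLE_eq]

-- ===== VERDICT =====
theorem gf_FillUintToBinaryLi_spec : Claim_equal_gf_FillUintToBinaryLi := by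
  intro v len _
  exact gf_eq v len
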